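-- pv_equiv track=rewrite | github.com/schutzcw/daily-coding-problems | easy/801/main.py | calc_sevenish_list
-- ===== SOURCE A (Python) =====
-- from typing import List
--
-- def calc_sevenish_list(num: int) -> List[int]:
--     """ """
--     sevenish_list = []
--     if num == 0:
--         return []
--
--     sevenish_list.append(pow(7,0))
--     num -= 1
--
--     power = 1
--     next = "power"
--     while num > 0:
--         if next == "power":
--             sevenish_list.append(pow(7,power))
--             power += 1
--             next = "sum"
--         else:
--             sevenish_list.append(sevenish_list[-2] + sevenish_list[-1])
--             next = "power"
--
--         num -= 1
--     return sevenish_list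
-- ===== SOURCE B (Python) =====
-- from typing import List
--
-- def calc_sevenish_list(num: int) -> List[int]:
--     """Closed form per index: odd index i holds 7**((i+1)//2), even index i
--     holds the geometric partial sum (7**(i//2+1) - 1)//6."""
--     if num == 0:
--         return []
--     result = [1]
--     for i in range(1, num):
--         if i % 2 == 1:
--             result.append(7 ** ((i + 1) // 2))
--         else:
--             result.append((7 ** (i // 2 + 1) - 1) // 6)
--     return result
-- ===== Notes on version B (the rewrite author's own statement) =====
-- stated objective: alternative
-- what changed: Replaces the 'power'/'sum' string-toggle while-loop with the list[-2]+list[-1] recurrence by a direct per-index closed form: odd index i gets 7**((i+1)//2), even index i gets the geometric partial sum (7**(i//2+1)-1)//6.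
import Mathlib
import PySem

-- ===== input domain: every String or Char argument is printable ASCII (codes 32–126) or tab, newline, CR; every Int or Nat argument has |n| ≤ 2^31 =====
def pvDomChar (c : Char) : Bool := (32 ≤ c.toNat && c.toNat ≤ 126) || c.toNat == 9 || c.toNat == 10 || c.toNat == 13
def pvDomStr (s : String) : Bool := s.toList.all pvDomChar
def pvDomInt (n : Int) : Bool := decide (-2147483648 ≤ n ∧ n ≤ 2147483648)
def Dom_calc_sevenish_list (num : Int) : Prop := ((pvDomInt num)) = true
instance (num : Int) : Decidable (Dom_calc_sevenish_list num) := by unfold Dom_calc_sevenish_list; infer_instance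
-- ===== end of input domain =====

-- B computes each element by a per-index closed form (power of 7 / geometric partial sum)
-- instead of A's string-toggle recurrence on the last two list entries; same cost, alternative decomposition.


-- ===== PORT A =====
-- the while-loop: fuel = remaining value of `num` (the loop decrements it by 1 each pass,
-- so it runs exactly (num-1).toNat times after the first append); `isPower` is next == "power".
-- sevenish_list[-2] / [-1] are read with pyGet?; `.getD 0` only discharges the Option
-- (the list always has ≥ 2 elements when that branch runs, as in the Python).
def calc_sevenish_list_loopA : Nat → List Int → Nat → Bool → List Int
  | 0, l, _, _ => l
  | Nat.succ n, l, power, isPower =>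
    if isPower then
      calc_sevenish_list_loopA n (l ++ [7 ^ power]) (power + 1) false
    else
      calc_sevenish_list_loopA n
        (l ++ [(PySem.List.pyGet? l (-2)).getD 0 + (PySem.List.pyGet? l (-1)).getD 0])
        power true

def calc_sevenish_list (num : Int) : List Int :=
  if num == 0 then []
  else
    -- sevenish_list.append(pow(7,0)); num -= 1; power = 1; next = "power"
    calc_sevenish_list_loopA (num - 1).toNat [7 ^ (0 : Nat)] 1 true

-- ===== PORT B =====
-- `for i in range(1, num)`; exponents (i+1)//2 and i//2+1 are nonnegative for i ≥ 1,
-- so `.toNat` on them is exact (they are exponents, not indices).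
def calc_sevenish_list_alt (num : Int) : List Int :=
  if num == 0 then []
  else
    (PySem.List.pyRange 1 num 1).foldl
      (fun result i =>
        if PySem.Int.mod i 2 == 1 then
          result ++ [7 ^ (PySem.Int.floordiv (i + 1) 2).toNat]
        else
          result ++ [PySem.Int.floordiv (7 ^ (PySem.Int.floordiv i 2 + 1).toNat - 1) 6])
      [1]

-- ===== PRECONDITION & SPEC =====
def Spec_calc_sevenish_list (num : Int) (out : List Int) : Prop := out = calc_sevenish_list_alt num
instance (num : Int) (out : List Int) : Decidable (Spec_calc_sevenish_list num out) := by unfold Spec_calc_sevenish_list; infer_instance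

-- ===== CLAIM (what is proved, stated in full; the proofs are below) =====
def Claim_equal_calc_sevenish_list : Prop := ∀ (num : Int), Dom_calc_sevenish_list num → Spec_calc_sevenish_list num (calc_sevenish_list num)

-- ===== LEMMAS AND PROOFS =====

-- S p = 1 + 7 + … + 7^(p-1), the exact value of the "sum" entries
def sevS : Nat → Int
  | 0 => 0
  | Nat.succ p => sevS p + 7 ^ p

-- the j-th element appended by A's loop starting at power state p
def sevStep (p j : Nat) : Int :=
  if j % 2 = 0 then 7 ^ (p + j / 2) else sevS (p + (j + 1) / 2)

lemma six_mul_sevS (p : Nat) : 6 * sevS p = 7 ^ p - 1 := by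
  induction p with
  | zero => simp [sevS]
  | succ p ih => simp [sevS, pow_succ]; linarith

lemma sevS_eq_div (p : Nat) : sevS p = (7 ^ p - 1) / 6 := by
  rw [← six_mul_sevS p, Int.mul_ediv_cancel_left _ (by norm_num)]

lemma loopA_spec (n : Nat) : ∀ (p : Nat) (l : List Int), l ≠ [] →
    l.getLast? = some (sevS (p)) → 1 ≤ p →
    calc_sevenish_list_loopA n l p true = l ++ (List.range n).map (sevStep p) := by
  induction n using Nat.twoStepInduction with
  | zero => intro p l _ _ _; simp [calc_sevenish_list_loopA]
  | one => intro p l _ _ _; simp [calc_sevenish_list_loopA, sevStep]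
  | more n ih _ =>
    intro p l hne hlast hp
    obtain ⟨l', a, rfl⟩ : ∃ l' a, l = l' ++ [a] := by
      rcases l.eq_nil_or_concat with rfl | h
      · cases hne rfl
      · simpa [List.concat_eq_append] using h
    have ha : a = sevS p := by simpa using hlast
    subst ha
    have hget2 : PySem.List.pyGet? ((l' ++ [sevS p]) ++ [(7:Int) ^ p]) (-2) = some (sevS p) := by
      simp [PySem.List.pyGet?, PySem.List.pyIdx?]
    have hget1 : PySem.List.pyGet? ((l' ++ [sevS p]) ++ [(7:Int) ^ p]) (-1) = some ((7:Int) ^ p) := by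
      simp [PySem.List.pyGet?, PySem.List.pyIdx?]
    have step2 : calc_sevenish_list_loopA (n + 2) (l' ++ [sevS p]) p true
        = calc_sevenish_list_loopA n ((l' ++ [sevS p]) ++ [(7:Int) ^ p] ++ [sevS (p + 1)]) (p + 1) true := by
      show calc_sevenish_list_loopA (Nat.succ (Nat.succ n)) _ _ _ = _
      rw [calc_sevenish_list_loopA, if_pos rfl, calc_sevenish_list_loopA, if_neg (by simp)]
      rw [hget2, hget1]
      simp [sevS]
    rw [step2, ih (p + 1) _ (by simp) (by simp) (by omega)]
    have hmap : (List.range (n + 2)).map (sevStep p)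
        = (7:Int) ^ p :: sevS (p + 1) :: (List.range n).map (sevStep (p + 1)) := by
      have h1 : List.range (n + 2) = 0 :: (List.range (n + 1)).map Nat.succ := List.range_succ_eq_map
      have h2 : List.range (n + 1) = 0 :: (List.range n).map Nat.succ := List.range_succ_eq_map
      rw [h1, h2]
      simp only [List.map_cons, List.map_map]
      refine congrArg₂ _ (by simp [sevStep]) (congrArg₂ _ (by simp [sevStep]) ?_)
      apply List.map_congr_left
      intro j _
      simp only [Function.comp]
      unfold sevStep
      rcases Nat.even_or_odd j with hj | hj
      · obtain ⟨k, rfl⟩ := hj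
        have e1 : (k + k + 1 + 1) % 2 = 0 := by omega
        have e2 : (k + k) % 2 = 0 := by omega
        rw [if_pos e1, if_pos e2]
        congr 1
        omega
      · obtain ⟨k, rfl⟩ := hj
        have e1 : (2 * k + 1 + 1 + 1) % 2 = 1 := by omega
        have e2 : (2 * k + 1) % 2 = 1 := by omega
        rw [if_neg (by omega), if_neg (by omega)]
        congr 1
        omega
    rw [hmap]
    simp

-- A's closed form
lemma portA_closed (num : Int) (h : num ≠ 0) :
    calc_sevenish_list num = 1 :: (List.range (num - 1).toNat).map (sevStep 1) := by
  unfold calc_sevenish_list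
  rw [if_neg (by simpa using h)]
  rw [loopA_spec _ 1 [7 ^ (0 : Nat)] (by simp) (by simp [sevS]) le_rfl]
  simp


-- the element B appends for i = 1 + n equals the j = n element of A's closed form
lemma bstep (n : Nat) :
    (if PySem.Int.mod ((1:Int) + (n:Int)) 2 == 1 then
        ([7 ^ (PySem.Int.floordiv ((1:Int) + (n:Int) + 1) 2).toNat] : List Int)
      else
        [PySem.Int.floordiv (7 ^ (PySem.Int.floordiv ((1:Int) + (n:Int)) 2 + 1).toNat - 1) 6])
    = [sevStep 1 n] := by
  have hmod : PySem.Int.mod ((1:Int) + (n:Int)) 2 = (((1 + n) % 2 : Nat) : Int) := by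
    exact_mod_cast PySem.Int.mod_natCast (1 + n) 2
  have hfd1 : PySem.Int.floordiv ((1:Int) + (n:Int) + 1) 2 = (((1 + n + 1) / 2 : Nat) : Int) := by
    exact_mod_cast PySem.Int.floordiv_natCast (1 + n + 1) 2
  have hfd2 : PySem.Int.floordiv ((1:Int) + (n:Int)) 2 = (((1 + n) / 2 : Nat) : Int) := by
    exact_mod_cast PySem.Int.floordiv_natCast (1 + n) 2
  rcases Nat.even_or_odd n with hn | hn
  · -- n even → i = 1 + n odd → power branch
    obtain ⟨k, rfl⟩ := hn
    have h1 : ((1 + (k + k)) % 2 : Nat) = 1 := by omega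
    rw [hmod, h1, if_pos (by norm_num), hfd1]
    unfold sevStep
    rw [if_pos (by omega)]
    have : (((1 + (k + k) + 1) / 2 : Nat) : Int).toNat = 1 + (k + k) / 2 := by omega
    rw [this]
  · -- n odd → i = 1 + n even → sum branch
    obtain ⟨k, rfl⟩ := hn
    have h1 : ((1 + (2 * k + 1)) % 2 : Nat) = 0 := by omega
    rw [hmod, h1, if_neg (by norm_num), hfd2]
    unfold sevStep
    rw [if_neg (by omega)]
    have hexp : ((((1 + (2 * k + 1)) / 2 : Nat) : Int) + 1).toNat = k + 2 := by omega
    rw [hexp]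
    have hdiv : PySem.Int.floordiv ((7:Int) ^ (k + 2) - 1) 6 = ((7:Int) ^ (k + 2) - 1) / 6 :=
      PySem.Int.floordiv_eq_ediv_of_pos (by norm_num)
    rw [hdiv, ← sevS_eq_div]
    have : 1 + (2 * k + 1 + 1) / 2 = k + 2 := by omega
    rw [this]

-- B's fold appends one closed-form element per i ∈ range(1, num)
lemma portB_closed (num : Int) (h : num ≠ 0) :
    calc_sevenish_list_alt num = 1 :: (List.range (num - 1).toNat).map (sevStep 1) := by
  unfold calc_sevenish_list_alt
  rw [if_neg (by simpa using h), PySem.List.pyRange_one]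
  have key : ∀ (n : Nat) (acc : List Int),
      ((List.range n).map (fun k : Nat => (1:Int) + (k:Int))).foldl
        (fun result i =>
          if PySem.Int.mod i 2 == 1 then
            result ++ [7 ^ (PySem.Int.floordiv (i + 1) 2).toNat]
          else
            result ++ [PySem.Int.floordiv (7 ^ (PySem.Int.floordiv i 2 + 1).toNat - 1) 6])
        acc
      = acc ++ (List.range n).map (sevStep 1) := by
    intro n
    induction n with
    | zero => intro acc; simp
    | succ n ih =>
      intro acc
      rw [List.range_succ]
      simp only [List.map_append, List.foldl_append, List.map_cons, List.map_nil,
        List.foldl_cons, List.foldl_nil, ih]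
      rw [← apply_ite (fun z => (acc ++ (List.range n).map (sevStep 1)) ++ z), bstep n,
        List.append_assoc]
  rw [key]
  rfl

-- ===== VERDICT (by name: the statement is the Claim_ definition above) =====
theorem calc_sevenish_list_spec : Claim_equal_calc_sevenish_list := by
  intro num _
  show calc_sevenish_list num = calc_sevenish_list_alt num
  by_cases h : num = 0
  · subst h; rfl
  · rw [portA_closed num h, portB_closed num h]
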